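-- pv_equiv track=rewrite | github.com/ferdavid1/DeepComponents | PH.py | morse
-- ===== SOURCE A (Python) =====
-- def morse(image_array): # plot image values as a signal, turned into a morse function
-- 	connected_components = []
-- 	for x in image_array:
-- 		cc = 0
-- 		ccs = []
-- 		for value in x:
-- 			if value != 0:
-- 				cc += 1
-- 			elif value == 0 and cc > 0:
-- 				ccs.append(cc)
-- 				cc = 0
-- 			else:
-- 				ccs.append(0)
-- 		connected_components.append(ccs)
-- 	new_connected = []
-- 	for c in connected_components:
-- 		if c == []:
-- 			new_connected.append(0)
-- 		else:
-- 			for x in c: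
-- 				new_connected.append(x)
-- 	return new_connected
-- ===== SOURCE B (Python) =====
-- def _runs(row):
--     # run-length encode the row by the key (v != 0)
--     runs = []
--     while row:
--         k = row[0] != 0
--         i = 1
--         while i < len(row) and (row[i] != 0) == k:
--             i += 1
--         runs.append((k, i))
--         row = row[i:]
--     return runs
--
-- def _emit(runs):
--     emitted = []
--     prev = 0
--     for k, n in runs:
--         if k:
--             prev = n
--         elif prev > 0:
--             emitted.append(prev)
--             emitted.extend([0] * (n - 1))
--             prev = 0
--         else:
--             emitted.extend([0] * n)
--     return emitted
--
-- def morse(image_array):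
--     out = []
--     for row in image_array:
--         e = _emit(_runs(row))
--         if e:
--             out.extend(e)
--         else:
--             out.append(0)
--     return out
-- ===== Notes on version B (the rewrite author's own statement) =====
-- stated objective: alternative
-- what changed: B first run-length-encodes each row by the key (v != 0) and then walks the run list emitting the last nonzero run length at each zero boundary, instead of A's single stateful per-element counter loop followed by a separate flatten over an intermediate list of rows.
import Mathlib
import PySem

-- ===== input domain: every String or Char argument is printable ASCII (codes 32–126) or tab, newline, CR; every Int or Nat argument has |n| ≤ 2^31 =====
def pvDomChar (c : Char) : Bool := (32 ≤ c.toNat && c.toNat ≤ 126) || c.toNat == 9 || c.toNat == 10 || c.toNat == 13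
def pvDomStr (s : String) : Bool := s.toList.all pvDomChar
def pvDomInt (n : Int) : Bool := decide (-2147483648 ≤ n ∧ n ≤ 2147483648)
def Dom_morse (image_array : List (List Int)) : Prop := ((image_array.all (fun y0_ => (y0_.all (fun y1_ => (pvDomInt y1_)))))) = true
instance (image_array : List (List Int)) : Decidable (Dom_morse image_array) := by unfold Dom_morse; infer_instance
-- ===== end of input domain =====

-- B re-implements the row scan as run-length encoding by (v != 0) plus a walk over the runs; same values, no speed claim.

-- ===== PORT A =====
-- inner loop of A over one row: state (cc, ccs)
def stepA (st : Int × List Int) (value : Int) : Int × List Int :=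
  if value ≠ 0 then (st.1 + 1, st.2)
  else if value = 0 ∧ st.1 > 0 then (0, st.2 ++ [st.1])
  else (st.1, st.2 ++ [(0 : Int)])

def morseRowA (x : List Int) : List Int :=
  (x.foldl stepA (0, [])).2

def morse (image_array : List (List Int)) : List Int :=
  let connected_components := image_array.foldl (fun acc x => acc ++ [morseRowA x]) []
  connected_components.foldl (fun nc c => if c = [] then nc ++ [(0 : Int)] else nc ++ c) []

-- ===== PORT B =====
-- inner while of _runs: count leading elements with key k, return (count, rest)
def spanRunB (k : Bool) : List Int → Nat × List Int
  | [] => (0, [])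
  | v :: rest =>
    if (decide (v ≠ 0)) = k then
      let p := spanRunB k rest
      (p.1 + 1, p.2)
    else (0, v :: rest)

theorem spanRunB_len (k : Bool) : ∀ (l : List Int), (spanRunB k l).2.length ≤ l.length := by
  intro l; induction l with
  | nil => simp [spanRunB]
  | cons v rest ih =>
    simp only [spanRunB]
    split
    · exact le_trans ih (Nat.le_succ _)
    · simp

def runsB (row : List Int) : List (Bool × Nat) :=
  match row with
  | [] => []
  | v :: rest =>
    let k := decide (v ≠ 0)
    let p := spanRunB k rest
    (k, p.1 + 1) :: runsB p.2
termination_by row.length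
decreasing_by
  simp only [List.length_cons]
  exact Nat.lt_succ_of_le (spanRunB_len _ rest)

-- the for-loop of _emit: state (emitted, prev)
def emitStepB (st : List Int × Nat) (kn : Bool × Nat) : List Int × Nat :=
  if kn.1 then (st.1, kn.2)
  else if st.2 > 0 then (st.1 ++ [(st.2 : Int)] ++ List.replicate (kn.2 - 1) (0 : Int), 0)
  else (st.1 ++ List.replicate kn.2 (0 : Int), 0)

def emitB (runs : List (Bool × Nat)) : List Int :=
  (runs.foldl emitStepB ([], 0)).1

def morse_alt (image_array : List (List Int)) : List Int :=
  image_array.foldl (fun out row =>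
    let e := emitB (runsB row)
    if e = [] then out ++ [(0 : Int)] else out ++ e) []

-- ===== PRECONDITION & SPEC =====
def Spec_morse (image_array : List (List Int)) (out : List Int) : Prop := out = morse_alt image_array
instance (image_array : List (List Int)) (out : List Int) : Decidable (Spec_morse image_array out) := by unfold Spec_morse; infer_instance

-- ===== CLAIM (what is proved, stated in full; the proofs are below) =====
def Claim_equal_morse : Prop := ∀ (image_array : List (List Int)), Dom_morse image_array → Spec_morse image_array (morse image_array)

-- ===== LEMMAS AND PROOFS =====

-- common recursive specification of one row's output, mirroring A's branch structure
def specRow : Int → List Int → List Int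
  | _, [] => []
  | cc, v :: rest =>
    if v ≠ 0 then specRow (cc + 1) rest
    else if cc > 0 then cc :: specRow 0 rest
    else (0 : Int) :: specRow cc rest


theorem runsB_nil : runsB [] = [] := by
  rw [runsB.eq_def]

theorem runsB_cons (v : Int) (rest : List Int) :
    runsB (v :: rest) =
      ((decide (v ≠ 0)), (spanRunB (decide (v ≠ 0)) rest).1 + 1) :: runsB (spanRunB (decide (v ≠ 0)) rest).2 := by
  rw [runsB.eq_def]

theorem rowA_spec (x : List Int) : ∀ (cc : Int) (ccs : List Int),
    (x.foldl stepA (cc, ccs)).2 = ccs ++ specRow cc x := by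
  induction x with
  | nil => intro cc ccs; simp [specRow]
  | cons v rest ih =>
    intro cc ccs
    rw [List.foldl_cons]
    by_cases hv : v = 0
    · subst hv
      by_cases hcc : cc > 0
      · rw [show stepA (cc, ccs) 0 = (0, ccs ++ [cc]) by simp [stepA, hcc], ih]
        simp [specRow, hcc]
      · rw [show stepA (cc, ccs) 0 = (cc, ccs ++ [(0 : Int)]) by simp [stepA, hcc], ih]
        simp [specRow, hcc]
    · rw [show stepA (cc, ccs) v = (cc + 1, ccs) by simp [stepA, hv], ih]
      simp [specRow, hv]

theorem morseRowA_eq (x : List Int) : morseRowA x = specRow 0 x := by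
  simpa using rowA_spec x 0 []

-- span of the true key advances specRow's counter
theorem specRow_span_true (rest : List Int) : ∀ (c : Int),
    specRow c rest = specRow (c + (spanRunB true rest).1) (spanRunB true rest).2 := by
  induction rest with
  | nil => intro c; simp [spanRunB]
  | cons v r ih =>
    intro c
    by_cases hv : v = 0
    · subst hv; simp [spanRunB]
    · have : (decide (v ≠ 0)) = true := by simp [hv]
      simp only [spanRunB, this, if_pos rfl]
      have := ih (c + 1)
      simp only [specRow, if_pos hv]
      rw [this]
      simp only [if_true]
      congr 1
      push_cast
      ring

-- span of the false key emits one zero per zero when the counter is 0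
theorem specRow_span_false (rest : List Int) :
    specRow 0 rest = List.replicate (spanRunB false rest).1 (0 : Int) ++ specRow 0 (spanRunB false rest).2 := by
  induction rest with
  | nil => simp [spanRunB]
  | cons v r ih =>
    by_cases hv : v = 0
    · subst hv
      have : (decide ((0 : Int) ≠ 0)) = false := by simp
      simp only [spanRunB, this, if_pos rfl]
      simp only [specRow]
      simp [List.replicate_succ, ih]
    · have : (decide (v ≠ 0)) = true := by simp [hv]
      simp [spanRunB, this]

-- after a true run the remainder starts with 0 (or is empty)
theorem spanRunB_true_head : ∀ (l : List Int) (v : Int) (r : List Int),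
    (spanRunB true l).2 = v :: r → v = 0 := by
  intro l
  induction l with
  | nil => intro v r h; simp [spanRunB] at h
  | cons w rest ih =>
    intro v r h
    by_cases hw : w = 0
    · have hd : (decide (w ≠ 0)) = false := by simp [hw]
      simp only [spanRunB, hd] at h
      simp at h
      rcases h with ⟨h1, _⟩
      exact h1 ▸ hw
    · have hd : (decide (w ≠ 0)) = true := by simp [hw]
      simp only [spanRunB, hd, if_pos rfl] at h
      exact ih v r h

-- the main B-side invariant
theorem emit_runs_spec : ∀ (n : Nat) (x : List Int), x.length ≤ n →
    ∀ (emitted : List Int) (prev : Nat),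
    (∀ v r, x = v :: r → v ≠ 0 → prev = 0) →
    ((runsB x).foldl emitStepB (emitted, prev)).1 = emitted ++ specRow (prev : Int) x := by
  intro n
  induction n with
  | zero =>
    intro x hx emitted prev _
    have : x = [] := List.eq_nil_of_length_eq_zero (Nat.le_zero.mp hx)
    subst this; simp [runsB_nil, specRow]
  | succ m ih =>
    intro x hx emitted prev hhead
    match x with
    | [] => simp [runsB_nil, specRow]
    | v :: rest =>
      by_cases hv : v = 0
      · -- zero run
        subst hv
        have hk : (decide ((0 : Int) ≠ 0)) = false := by simp
        rw [runsB_cons]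
        simp only [hk]
        set p := spanRunB false rest with hp
        have hlen : p.2.length ≤ m := by
          have h2 : p.2.length ≤ rest.length := by rw [hp]; exact spanRunB_len false rest
          simp at hx; omega
        have hh : ∀ v r, p.2 = v :: r → v ≠ 0 → (0 : Nat) = 0 := by intro _ _ _ _; rfl
        rw [List.foldl_cons]
        by_cases hprev : prev > 0
        · have hstep : emitStepB (emitted, prev) (false, p.1 + 1) =
              (emitted ++ [(prev : Int)] ++ List.replicate p.1 (0 : Int), 0) := by
            simp [emitStepB, hprev]
          rw [hstep, ih p.2 hlen _ 0 hh]
          simp only [Nat.cast_zero]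
          have hs : specRow (prev : Int) (0 :: rest) = (prev : Int) :: specRow 0 rest := by
            simp only [specRow]
            rw [if_neg (by simp), if_pos (by exact_mod_cast hprev)]
          rw [hs, specRow_span_false rest, ← hp]
          simp
        · have hp0 : prev = 0 := Nat.eq_zero_of_not_pos hprev
          subst hp0
          have hstep : emitStepB (emitted, 0) (false, p.1 + 1) =
              (emitted ++ List.replicate (p.1 + 1) (0 : Int), 0) := by
            simp [emitStepB]
          rw [hstep, ih p.2 hlen _ 0 hh]
          simp only [Nat.cast_zero]
          have hs : specRow (0 : Int) (0 :: rest) = (0 : Int) :: specRow 0 rest := by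
            simp [specRow]
          rw [hs, specRow_span_false rest, ← hp]
          simp [List.replicate_succ]
      · -- nonzero run
        have hk : (decide (v ≠ 0)) = true := by simp [hv]
        have hprev0 : prev = 0 := hhead v rest rfl hv
        subst hprev0
        rw [runsB_cons]
        simp only [hk]
        set p := spanRunB true rest with hp
        have hlen : p.2.length ≤ m := by
          have h2 : p.2.length ≤ rest.length := by rw [hp]; exact spanRunB_len true rest
          simp at hx; omega
        have hh : ∀ w r, p.2 = w :: r → w ≠ 0 → p.1 + 1 = 0 := by
          intro w r hw hwne
          exact absurd (spanRunB_true_head rest w r (hp ▸ hw)) hwne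
        rw [List.foldl_cons]
        have hstep : emitStepB (emitted, 0) (true, p.1 + 1) = (emitted, p.1 + 1) := by
          simp [emitStepB]
        rw [hstep, ih p.2 hlen _ (p.1 + 1) hh]
        simp only [Nat.cast_zero]
        have hs : specRow (0 : Int) (v :: rest) = specRow 1 rest := by
          simp [specRow, hv]
        rw [hs, specRow_span_true rest 1, ← hp]
        congr 2
        push_cast
        ring

theorem rowB_eq (x : List Int) : emitB (runsB x) = specRow 0 x := by
  have := emit_runs_spec x.length x (le_refl _) [] 0 (by intro _ _ _ _; rfl)
  simpa [emitB] using this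

theorem row_eq (x : List Int) : morseRowA x = emitB (runsB x) := by
  rw [morseRowA_eq, rowB_eq]

-- A's first loop builds map morseRowA
theorem foldl_snoc_map (l : List (List Int)) : ∀ (acc : List (List Int)),
    l.foldl (fun acc x => acc ++ [morseRowA x]) acc = acc ++ l.map morseRowA := by
  induction l with
  | nil => simp
  | cons y ys ih => intro acc; simp [ih]

-- ===== VERDICT (by name: the statement is the Claim_ definition above) =====
theorem morse_spec : Claim_equal_morse := by
  intro image_array _
  unfold Spec_morse morse morse_alt
  rw [foldl_snoc_map image_array []]
  simp only [List.nil_append, List.foldl_map]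
  exact List.foldl_ext _ _ _ (fun out row _ => by rw [row_eq row])
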